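-- pv_equiv track=rewrite | github.com/AlgoLeadMe/AlgoLeadMe-1 | H0ngJu/그리디/A와 B.py | solution
-- ===== SOURCE A (Python) =====
-- def solution(cur, target):
--     if len(cur) == len(target): # len(cur) == len(target)
--         if cur == target:
--             return 1
--         else: return 0
--
--     elif len(cur) < len(target): # len(cur) < len(target)
--         if target[-1] ==  "A":
--             target.pop()
--             return solution(cur, target)
--         else:
--             target.pop()
--             target = target[::-1]
--             return solution(cur, target)
--
--     else: # len(cur) > len(target)
--         return 0
-- ===== SOURCE B (Python) =====
-- def solution(cur, target):
--     # Two-pointer scan over target with a direction flag: consume the current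
--     # "last" element from the appropriate end instead of popping/reversing lists.
--     lo, hi, rev = 0, len(target), False
--     while hi - lo > len(cur):
--         if rev:
--             ch = target[lo]
--             lo += 1
--         else:
--             ch = target[hi - 1]
--             hi -= 1
--         if ch != "A":
--             rev = not rev
--     seg = target[lo:hi]
--     if rev:
--         seg = seg[::-1]
--     return 1 if seg == cur else 0
-- ===== Notes on version B (the rewrite author's own statement) =====
-- stated objective: alternative
-- what changed: Replaces A's recursion that physically pops and reverses the target list at each step with a single two-pointer scan over the unchanged target plus a direction flag, reversing (at most) once at the end.
import Mathlib
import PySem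

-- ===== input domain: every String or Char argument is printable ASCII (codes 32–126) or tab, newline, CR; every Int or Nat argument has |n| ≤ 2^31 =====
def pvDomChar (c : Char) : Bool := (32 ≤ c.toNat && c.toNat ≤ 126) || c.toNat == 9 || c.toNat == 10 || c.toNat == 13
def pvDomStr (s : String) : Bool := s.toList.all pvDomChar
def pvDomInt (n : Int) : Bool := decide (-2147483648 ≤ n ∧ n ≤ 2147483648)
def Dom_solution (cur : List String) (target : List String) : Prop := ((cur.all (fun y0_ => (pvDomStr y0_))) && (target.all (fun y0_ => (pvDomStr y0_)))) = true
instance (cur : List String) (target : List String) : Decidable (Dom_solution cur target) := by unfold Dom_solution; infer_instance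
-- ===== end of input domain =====

-- B replaces A's pop-and-reverse recursion by a two-pointer scan with a direction flag;
-- A mutates its `target` argument in place (pops), B does not: the equivalence is about the return value only.

-- ===== PORT A =====
-- Python A recurses after target.pop() (list minus last element) resp. target.pop(); target[::-1].
-- target[-1] is read only when len(target) > len(cur) ≥ 0, so `getLast?.getD ""` is exact there.
def solution (cur : List String) (target : List String) : Int :=
  if cur.length = target.length then
    (if cur = target then 1 else 0)
  else if cur.length < target.length then
    (if target.getLast?.getD "" = "A" then
      solution cur target.dropLast
    else
      solution cur target.dropLast.reverse)
  else 0
termination_by target.length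
decreasing_by all_goals
  (have h : target ≠ [] := by rintro rfl; simp_all
   simpa [List.length_dropLast] using Nat.sub_lt (List.length_pos_of_ne_nil h) one_pos)

-- ===== PORT B =====
-- the while loop of Source B; indices lo ≤ hi ≤ target.length are maintained by the loop, so
-- target[lo] / target[hi-1] are `getD` (exact in range) and target[lo:hi] is (drop lo).take (hi-lo).
def solutionAltLoop (cur : List String) (target : List String) (lo hi : Nat) (rev : Bool) : Int :=
  if cur.length < hi - lo then
    (if rev then
      (if target.getD lo "" ≠ "A" then solutionAltLoop cur target (lo+1) hi false
       else solutionAltLoop cur target (lo+1) hi true)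
    else
      (if target.getD (hi-1) "" ≠ "A" then solutionAltLoop cur target lo (hi-1) true
       else solutionAltLoop cur target lo (hi-1) false))
  else
    (let seg := (target.drop lo).take (hi - lo)
     let seg := if rev then seg.reverse else seg
     if seg = cur then 1 else 0)
termination_by hi - lo
decreasing_by all_goals omega

def solution_alt (cur : List String) (target : List String) : Int :=
  solutionAltLoop cur target 0 target.length false

-- ===== PRECONDITION & SPEC =====
def Spec_solution (cur : List String) (target : List String) (out : Int) : Prop := out = solution_alt cur target
instance (cur : List String) (target : List String) (out : Int) : Decidable (Spec_solution cur target out) := by unfold Spec_solution; infer_instance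

-- ===== CLAIM (what is proved, stated in full; the proofs are below) =====
def Claim_equal_solution : Prop := ∀ (cur : List String) (target : List String), Dom_solution cur target → Spec_solution cur target (solution cur target)

-- ===== LEMMAS AND PROOFS =====

-- the list A's recursion is currently working on, expressed through B's loop state
def pvView (target : List String) (lo hi : Nat) (rev : Bool) : List String :=
  let seg := (target.drop lo).take (hi - lo)
  if rev then seg.reverse else seg

theorem pvView_length (target : List String) (lo hi : Nat) (h : hi ≤ target.length) (h' : lo ≤ hi) :
    (pvView target lo hi rev).length = hi - lo := by
  unfold pvView
  cases rev <;> simp <;> omega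

-- the segment target[lo:hi]
def pvSeg (target : List String) (lo hi : Nat) : List String := (target.drop lo).take (hi - lo)

theorem pvSeg_length (target : List String) (lo hi : Nat) (_h1 : lo ≤ hi) (h2 : hi ≤ target.length) :
    (pvSeg target lo hi).length = hi - lo := by
  unfold pvSeg; simp; omega

theorem pvSeg_getLast (target : List String) (lo hi : Nat) (h1 : lo < hi) (h2 : hi ≤ target.length) :
    (pvSeg target lo hi).getLast?.getD "" = target.getD (hi-1) "" := by
  rw [List.getLast?_eq_getElem?, pvSeg_length target lo hi (le_of_lt h1) h2]
  unfold pvSeg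
  rw [List.getElem?_take_of_lt (by omega), List.getElem?_drop, List.getD_eq_getElem?_getD]
  congr 2
  omega

theorem pvSeg_head (target : List String) (lo hi : Nat) (h1 : lo < hi) (_h2 : hi ≤ target.length) :
    (pvSeg target lo hi).head?.getD "" = target.getD lo "" := by
  unfold pvSeg
  rw [List.head?_eq_getElem?, List.getElem?_take_of_lt (by omega), List.getElem?_drop,
    List.getD_eq_getElem?_getD, Nat.add_zero]

theorem pvSeg_dropLast (target : List String) (lo hi : Nat) (h1 : lo ≤ hi) (h2 : hi ≤ target.length) :
    (pvSeg target lo hi).dropLast = pvSeg target lo (hi-1) := by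
  rw [List.dropLast_eq_take, pvSeg_length target lo hi h1 h2]
  unfold pvSeg
  rw [List.take_take]
  congr 1
  omega

theorem pvSeg_tail (target : List String) (lo hi : Nat) :
    (pvSeg target lo hi).tail = pvSeg target (lo+1) hi := by
  unfold pvSeg
  rw [← List.drop_one, List.drop_take, List.drop_drop]
  congr 1

theorem solutionAltLoop_eq (cur target : List String) :
    ∀ n lo hi rev, hi - lo = n → lo ≤ hi → hi ≤ target.length →
      solutionAltLoop cur target lo hi rev = solution cur (pvView target lo hi rev) := by
  intro n
  induction n using Nat.strong_induction_on with
  | _ n ih =>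
    intro lo hi rev hn h1 h2
    have hvlen : (pvView target lo hi rev).length = hi - lo := pvView_length target lo hi h2 h1
    rw [solutionAltLoop, solution, hvlen]
    by_cases hc : cur.length < hi - lo
    · -- the loop continues; A pops (and possibly reverses)
      have hlt : lo < hi := by omega
      have hne0 : cur.length ≠ hi - lo := by omega
      rw [if_pos hc, if_neg hne0, if_pos hc]
      cases rev with
      | false =>
        have hview : pvView target lo hi false = pvSeg target lo hi := by
          simp [pvView, pvSeg]
        rw [hview, pvSeg_getLast target lo hi hlt h2, pvSeg_dropLast target lo hi h1 h2]
        by_cases hA : target.getD (hi-1) "" = "A"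
        · rw [if_pos hA, if_neg (not_not_intro hA),
            ih (hi-1-lo) (by omega) lo (hi-1) false rfl (by omega) (by omega)]
          simp [pvView, pvSeg]
        · rw [if_neg hA, if_pos hA,
            ih (hi-1-lo) (by omega) lo (hi-1) true rfl (by omega) (by omega)]
          simp [pvView, pvSeg]
      | true =>
        have hview : pvView target lo hi true = (pvSeg target lo hi).reverse := by
          simp [pvView, pvSeg]
        rw [hview, List.getLast?_reverse, pvSeg_head target lo hi hlt h2,
          List.dropLast_reverse, pvSeg_tail target lo hi, List.reverse_reverse]
        by_cases hA : target.getD lo "" = "A"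
        · rw [if_pos hA, if_neg (not_not_intro hA),
            ih (hi-(lo+1)) (by omega) (lo+1) hi true rfl (by omega) h2]
          simp [pvView, pvSeg]
        · rw [if_neg hA, if_pos hA,
            ih (hi-(lo+1)) (by omega) (lo+1) hi false rfl (by omega) h2]
          simp [pvView, pvSeg]
    · -- the loop stops; A compares lists or (shorter target) returns 0
      rw [if_neg hc]
      by_cases heq : cur.length = hi - lo
      · rw [if_pos heq]
        simp only [pvView]
        cases rev <;> simp [eq_comm]
      · rw [if_neg heq, if_neg hc]
        have hne : ¬ ((if rev = true then ((target.drop lo).take (hi - lo)).reverse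
            else (target.drop lo).take (hi - lo)) = cur) := by
          intro h
          apply heq
          rw [← h]
          cases rev <;> simp <;> omega
        simp only [hne, if_false]

-- ===== VERDICT (by name: the statement is the Claim_ definition above) =====
theorem solution_spec : Claim_equal_solution := by
  intro cur target _
  unfold Spec_solution solution_alt
  rw [solutionAltLoop_eq cur target (target.length) 0 target.length false (by omega) (Nat.zero_le _) le_rfl]
  simp [pvView]
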